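-- pv_equiv track=rewrite | github.com/Akuukis/pandemic-estimator | scripts/export.py | force_cumulative_deaths
-- ===== SOURCE A (Python) =====
-- def force_cumulative_deaths(cases):
--     error_count = 0
--     curr_value = 0
--     for case in cases:
--         value = int(case[2])
--         if value < curr_value:
--             error_count = error_count + 1
--             case[2] = curr_value
--         else:
--             curr_value = value
--
--     if error_count > 0:
--         return True
--     else:
--         return False
-- ===== SOURCE B (Python) =====
-- def force_cumulative_deaths(cases):
--     # Pass 1: prefix running maxima of the death counts (starting from 0).
--     maxima = []
--     m = 0
--     for case in cases:
--         m = max(m, int(case[2]))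
--         maxima.append(m)
--     # Pass 2: any value strictly below its prefix maximum is a correction.
--     changed = False
--     for case, m in zip(cases, maxima):
--         if int(case[2]) < m:
--             case[2] = m
--             changed = True
--     return changed
-- ===== Notes on version B (the rewrite author's own statement) =====
-- stated objective: alternative
-- what changed: Replaces the single error-counting loop carrying a running current value by a two-pass decomposition: first build the list of prefix maxima, then zip it with the cases to flag and fix strict drops, returning a boolean flag instead of a counter.
import Mathlib
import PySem

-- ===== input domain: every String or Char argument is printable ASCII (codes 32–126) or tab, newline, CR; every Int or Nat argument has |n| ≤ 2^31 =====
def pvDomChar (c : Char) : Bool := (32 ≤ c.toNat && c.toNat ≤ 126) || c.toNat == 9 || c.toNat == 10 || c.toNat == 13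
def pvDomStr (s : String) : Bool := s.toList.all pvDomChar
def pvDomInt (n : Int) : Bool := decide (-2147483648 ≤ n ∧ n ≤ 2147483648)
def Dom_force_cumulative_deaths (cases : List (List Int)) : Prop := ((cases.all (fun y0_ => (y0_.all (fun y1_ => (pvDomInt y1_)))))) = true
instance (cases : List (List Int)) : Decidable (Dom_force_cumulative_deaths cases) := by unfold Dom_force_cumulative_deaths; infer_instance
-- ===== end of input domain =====

-- B changes the decomposition (two passes: prefix maxima, then zip-and-compare) and returns
-- a boolean flag instead of counting errors; both Pythons mutate `cases` in place and the
-- equivalence proved here is about the RETURN value only (the mutations happen to coincide).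

-- ===== PORT A =====
-- case[2]: `none` = IndexError, excluded by Pre_ (we default to 0 there, outside the claim)
def pvGet2 (c : List Int) : Int := (PySem.List.pyGet? c 2).getD 0

def force_cumulative_deaths (cases : List (List Int)) : Bool :=
  let st := cases.foldl
    (fun (st : Int × Int) case =>
      let value := pvGet2 case
      if value < st.2 then (st.1 + 1, st.2) else (st.1, value))
    (0, 0)
  if st.1 > 0 then true else false

-- ===== PORT B =====
def force_cumulative_deaths_alt (cases : List (List Int)) : Bool :=
  -- pass 1: prefix running maxima (the mutation in pass 2 never affects pass 1's reads)
  let maxima := (cases.foldl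
      (fun (acc : List Int × Int) case =>
        let m := max acc.2 (pvGet2 case)
        (acc.1 ++ [m], m))
      ([], 0)).1
  -- pass 2: a value strictly below its prefix maximum is a correction
  (cases.zip maxima).foldl
    (fun changed cm => if pvGet2 cm.1 < cm.2 then true else changed) false

-- ===== PRECONDITION & SPEC =====
-- Pre_ excludes exactly the inputs where Python's `case[2]` raises IndexError (a row shorter than 3)
def Pre_force_cumulative_deaths (cases : List (List Int)) : Prop :=
  ∀ c ∈ cases, 3 ≤ c.length
instance (cases : List (List Int)) : Decidable (Pre_force_cumulative_deaths cases) := by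
  unfold Pre_force_cumulative_deaths; infer_instance
def pvWitness_force_cumulative_deaths : List (List Int) := [[0, 0, 5], [0, 0, 3]]

def Spec_force_cumulative_deaths (cases : List (List Int)) (out : Bool) : Prop := out = force_cumulative_deaths_alt cases
instance (cases : List (List Int)) (out : Bool) : Decidable (Spec_force_cumulative_deaths cases out) := by unfold Spec_force_cumulative_deaths; infer_instance

-- ===== CLAIM (what is proved, stated in full; the proofs are below) =====
def Claim_equal_force_cumulative_deaths : Prop := ∀ (cases : List (List Int)), Dom_force_cumulative_deaths cases → Pre_force_cumulative_deaths cases → Spec_force_cumulative_deaths cases (force_cumulative_deaths cases)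

-- ===== LEMMAS AND PROOFS =====

/-- The sequence of prefix maxima B builds. -/
def scanMax (m : Int) : List (List Int) → List Int
  | [] => []
  | c :: cs => max m (pvGet2 c) :: scanMax (max m (pvGet2 c)) cs

/-- Reference predicate: some value drops strictly below the running maximum. -/
def hasDrop (m : Int) : List (List Int) → Bool
  | [] => false
  | c :: cs => decide (pvGet2 c < m) || hasDrop (max m (pvGet2 c)) cs

theorem foldA_pos (cs : List (List Int)) : ∀ (e m : Int), 0 ≤ e →
    (0 < (cs.foldl
      (fun (st : Int × Int) case =>
        let value := pvGet2 case
        if value < st.2 then (st.1 + 1, st.2) else (st.1, value)) (e, m)).1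
      ↔ 0 < e ∨ hasDrop m cs = true) := by
  induction cs with
  | nil => intro e m he; simp [hasDrop]
  | cons c cs ih =>
    intro e m he
    by_cases h : pvGet2 c < m
    · have hmax : max m (pvGet2 c) = m := by omega
      simp only [List.foldl, hasDrop, if_pos h, hmax]
      rw [ih (e + 1) m (by omega)]
      constructor
      · intro _; right; simp [h]
      · intro _; left; omega
    · have hmax : max m (pvGet2 c) = pvGet2 c := by omega
      simp only [List.foldl, hasDrop, if_neg h, hmax]
      rw [ih e (pvGet2 c) he]
      simp [h]

theorem foldB_maxima (cs : List (List Int)) : ∀ (acc : List Int) (m : Int),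
    (cs.foldl
      (fun (acc : List Int × Int) case =>
        let m := max acc.2 (pvGet2 case)
        (acc.1 ++ [m], m)) (acc, m)).1 = acc ++ scanMax m cs := by
  induction cs with
  | nil => intro acc m; simp [scanMax]
  | cons c cs ih =>
    intro acc m
    simp only [List.foldl, scanMax]
    rw [ih]
    simp

theorem foldB_zip (cs : List (List Int)) : ∀ (m : Int) (b : Bool),
    ((cs.zip (scanMax m cs)).foldl
      (fun changed cm => if pvGet2 cm.1 < cm.2 then true else changed) b)
      = (b || hasDrop m cs) := by
  induction cs with
  | nil => intro m b; simp [scanMax, hasDrop]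
  | cons c cs ih =>
    intro m b
    simp only [scanMax, List.zip_cons_cons, List.foldl, hasDrop]
    rw [ih]
    by_cases h : pvGet2 c < m
    · have : pvGet2 c < max m (pvGet2 c) := by omega
      simp [h, this]
    · have : ¬ pvGet2 c < max m (pvGet2 c) := by omega
      simp [h, this]

theorem both_eq_hasDrop (cases : List (List Int)) :
    force_cumulative_deaths cases = force_cumulative_deaths_alt cases := by
  unfold force_cumulative_deaths force_cumulative_deaths_alt
  rw [foldB_maxima cases [] 0, List.nil_append, foldB_zip cases 0 false, Bool.false_or]
  have h := foldA_pos cases 0 0 (le_refl 0)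
  by_cases hd : hasDrop 0 cases = true
  · simp only [hd, or_true, iff_true] at h
    simp [h, hd]
  · have h2 : ¬ (0:Int) < (List.foldl
        (fun (st : Int × Int) case =>
          if pvGet2 case < st.2 then (st.1 + 1, st.2) else (st.1, pvGet2 case)) (0, 0) cases).1 := by
      simp [hd] at h; omega
    simp [h2, hd]

-- ===== VERDICT (by name: the statement is the Claim_ definition above) =====
theorem force_cumulative_deaths_spec : Claim_equal_force_cumulative_deaths := by
  intro cases _ _
  unfold Spec_force_cumulative_deaths
  exact both_eq_hasDrop cases
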